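-- pv_equiv track=rewrite | github.com/jsk-ros-pkg/jsk_3rdparty | gdrive_recorder/node_scripts/gdrive_recorder.py | _create_file_days_dict
-- ===== SOURCE A (Python) =====
-- def _create_file_days_dict(file_titles):
--     file_days_dict = {}
--     for file_id, file_title in enumerate(file_titles):
--         file_day = file_title.split('_')[0]
--         if file_day in file_days_dict:
--             file_days_dict[file_day].append(file_id)
--         else:
--             file_days_dict[file_day] = [file_id]
--     return file_days_dict
-- ===== SOURCE B (Python) =====
-- def _create_file_days_dict(file_titles):
--     days = [t.split('_')[0] for t in file_titles]
--     return {d: [i for i, x in enumerate(days) if x == d]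
--             for d in dict.fromkeys(days)}
-- ===== Notes on version B (the rewrite author's own statement) =====
-- stated objective: alternative
-- what changed: Replaces A's single-pass incremental dict accumulation (membership test, append-or-create per element) with a dedup-then-filter scheme: collect the distinct day prefixes in first-occurrence order (dict.fromkeys), then for each distinct day gather its indices by an independent filter scan over the precomputed day list.
import Mathlib
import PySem

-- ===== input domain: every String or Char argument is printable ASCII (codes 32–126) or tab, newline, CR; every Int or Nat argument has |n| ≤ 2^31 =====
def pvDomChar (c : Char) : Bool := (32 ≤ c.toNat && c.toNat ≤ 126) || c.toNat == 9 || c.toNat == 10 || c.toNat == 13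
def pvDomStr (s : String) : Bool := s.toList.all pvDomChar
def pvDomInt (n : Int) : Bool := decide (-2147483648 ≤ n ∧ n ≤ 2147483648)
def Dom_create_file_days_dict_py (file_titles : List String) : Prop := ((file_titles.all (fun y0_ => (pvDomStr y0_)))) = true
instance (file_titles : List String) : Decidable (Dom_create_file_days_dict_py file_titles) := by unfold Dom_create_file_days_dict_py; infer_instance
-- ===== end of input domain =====

-- B replaces A's incremental single-pass dict accumulation with a dedup-then-filter
-- scheme: distinct day prefixes in first-occurrence order, then an independent filter
-- scan per distinct day; alternative decomposition, no speed claim.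


-- ===== PORT A =====
-- file_title.split('_')[0]  (split? is some since the separator "_" is nonempty; the result is nonempty so index 0 is in range)
def pvDay (t : String) : String := PySem.List.pyGetD ((PySem.Str.split? t "_").getD []) 0 ""

def create_file_days_dict_py (file_titles : List String) : List (String × List Int) :=
  ((PySem.List.enumerate file_titles).foldl
    (fun d p =>
      let file_day := pvDay p.2
      if d.contains file_day then d.modify file_day [] (fun l => l ++ [p.1])
      else d.insert file_day [p.1])
    PySem.Dict.empty).items

-- ===== PORT B =====
def create_file_days_dict_py_alt (file_titles : List String) : List (String × List Int) :=
  let days := file_titles.map pvDay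
  ((PySem.List.dedup days).foldl
    (fun g d => g.insert d
      (((PySem.List.enumerate days).filter (fun p => p.2 == d)).map (fun p => p.1)))
    PySem.Dict.empty).items

-- ===== PRECONDITION & SPEC =====
def Spec_create_file_days_dict_py (file_titles : List String) (out : List (String × List Int)) : Prop := out = create_file_days_dict_py_alt file_titles
instance (file_titles : List String) (out : List (String × List Int)) : Decidable (Spec_create_file_days_dict_py file_titles out) := by unfold Spec_create_file_days_dict_py; infer_instance

-- ===== CLAIM (what is proved, stated in full; the proofs are below) =====
def Claim_equal_create_file_days_dict_py : Prop := ∀ (file_titles : List String), Dom_create_file_days_dict_py file_titles → Spec_create_file_days_dict_py file_titles (create_file_days_dict_py file_titles)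

-- ===== LEMMAS AND PROOFS =====

-- A's branch (append to the existing list / create a singleton) is exactly Dict.modify with default []
theorem pv_step_eq (d : PySem.Dict String (List Int)) (p : Int × String) :
    (let file_day := pvDay p.2
     if d.contains file_day then d.modify file_day [] (fun l => l ++ [p.1])
     else d.insert file_day [p.1]) =
    d.modify (pvDay p.2) [] (fun l => l ++ [p.1]) := by
  by_cases h : d.contains (pvDay p.2) = true
  · simp [h]
  · simp only [Bool.not_eq_true] at h
    simp [h, PySem.Dict.modify, PySem.Dict.getD_of_not_contains d _ h]

theorem pv_enumerate_map {α β : Type} (f : α → β) (xs : List α) (s : Int) :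
    PySem.List.enumerate (xs.map f) s = (PySem.List.enumerate xs s).map (fun p => (p.1, f p.2)) := by
  induction xs generalizing s with
  | nil => rfl
  | cons x xs ih => simp [PySem.List.enumerate_cons, ih]

theorem pv_map_day_enumerate (file_titles : List String) :
    (PySem.List.enumerate file_titles).map (fun p => pvDay p.2) = file_titles.map pvDay := by
  rw [show (fun p : Int × String => pvDay p.2) = pvDay ∘ (fun p : Int × String => p.2) from rfl,
      ← List.map_map, PySem.List.map_snd_enumerate]

-- A's dict lookup, as a filter of the enumerated day list
theorem pv_groupfold_getD (days : List String) (d : PySem.Dict String (List Int)) (k : String) :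
    ((PySem.List.enumerate days).foldl
      (fun g p => g.modify p.2 [] (fun l => l ++ [p.1])) d).getD k [] =
    d.getD k [] ++
      ((PySem.List.enumerate days).filter (fun p => p.2 == k)).map (fun p => p.1) := by
  have : ((PySem.List.enumerate days).foldl
      (fun g p => g.modify p.2 [] (fun l => l ++ [p.1])) d) =
      ((PySem.List.enumerate days).map (fun p => (p.2, p.1))).foldl
      (fun g q => g.modify q.1 [] (fun l => l ++ [q.2])) d := by
    rw [List.foldl_map]
  rw [this, PySem.Dict.getD_foldl_modify_append, List.filter_map, List.map_map]
  simp [Function.comp_def]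

-- ===== VERDICT (by name: the statement is the Claim_ definition above) =====
theorem create_file_days_dict_py_spec : Claim_equal_create_file_days_dict_py := by
  intro file_titles _
  unfold Spec_create_file_days_dict_py create_file_days_dict_py create_file_days_dict_py_alt
  have hstep : (fun (d : PySem.Dict String (List Int)) (p : Int × String) =>
      let file_day := pvDay p.2
      if d.contains file_day then d.modify file_day [] (fun l => l ++ [p.1])
      else d.insert file_day [p.1]) =
      (fun d p => d.modify (pvDay p.2) [] (fun l => l ++ [p.1])) := by
    funext d p; exact pv_step_eq d p
  rw [hstep]
  set days := file_titles.map pvDay with hdays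
  set DA := (PySem.List.enumerate file_titles).foldl
      (fun d p => d.modify (pvDay p.2) [] (fun l => l ++ [p.1])) PySem.Dict.empty with hDA
  -- A's side: items = distinct days (first occurrence order) mapped to their filtered index lists
  have hAkeys : DA.keys = PySem.Set.ofList days := by
    rw [hDA, PySem.Dict.keys_foldl_modify_key _ (fun p : Int × String => pvDay p.2) []
          (fun _ p (l : List Int) => l ++ [p.1]),
        PySem.Dict.keys_empty, PySem.Set.update_nil_left, pv_map_day_enumerate]
  have hAnd : DA.keys.Nodup := by
    rw [hDA]
    exact PySem.Dict.nodup_keys_foldl_modify_key _ (fun p : Int × String => pvDay p.2) []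
      (fun _ p (l : List Int) => l ++ [p.1]) _ (by simp [PySem.Dict.keys_empty])
  have hgetA : ∀ k, DA.getD k [] =
      ((PySem.List.enumerate days).filter (fun p => p.2 == k)).map (fun p => p.1) := by
    intro k
    have h1 : DA = (PySem.List.enumerate days).foldl
        (fun g p => g.modify p.2 [] (fun l => l ++ [p.1])) PySem.Dict.empty := by
      rw [hDA, hdays, pv_enumerate_map, List.foldl_map]
    rw [h1, pv_groupfold_getD, PySem.Dict.getD_empty, List.nil_append]
  rw [PySem.Dict.items_eq_map_keys DA hAnd [], hAkeys]
  -- B's side: a fold of fresh distinct inserts appends exactly that same list of pairs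
  have hB : ((PySem.List.dedup days).foldl
      (fun g d => g.insert d
        (((PySem.List.enumerate days).filter (fun p => p.2 == d)).map (fun p => p.1)))
      PySem.Dict.empty).items =
      (PySem.List.dedup days).map (fun d => (d,
        ((PySem.List.enumerate days).filter (fun p => p.2 == d)).map (fun p => p.1))) := by
    simpa using PySem.Dict.items_foldl_insert_fresh (PySem.List.dedup days) id
      (fun d => ((PySem.List.enumerate days).filter (fun p => p.2 == d)).map (fun p => p.1))
      PySem.Dict.empty
      (fun a _ => by simp [PySem.Dict.contains_empty])
      (by simp)
  show _ = ((PySem.List.dedup days).foldl _ PySem.Dict.empty).items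
  rw [hB, PySem.List.dedup_eq_ofList]
  exact List.map_congr_left (fun k _ => by rw [hgetA k])
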